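-- pv_equiv track=rewrite | github.com/rv192/MyNav | CheckWords.py | find_used_words
-- ===== SOURCE A (Python) =====
-- def find_used_words(story, words):
--     used_words = {}
--     story_lower = story.lower()  # 将故事内容转换为小写以进行大小写不敏感的匹配
--     for word in words:
--         if word.lower() in story_lower:
--             index = story_lower.index(word.lower())
--             used_words[word] = index
--     return used_words
-- ===== SOURCE B (Python) =====
-- def find_used_words(story, words):
--     # Position-major scan: instead of searching the story once per word, walk
--     # the story left to right a single time; at each index, every still-pending
--     # lowered pattern that starts there gets that index recorded, and the scan
--     # stops as soon as no pattern is pending.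
--     story_lower = story.lower()
--     pending = list(dict.fromkeys(w.lower() for w in words))
--     first = {}
--     for i in range(len(story_lower) + 1):
--         if not pending:
--             break
--         still = []
--         for p in pending:
--             if story_lower[i:i+len(p)] == p:
--                 first[p] = i
--             else:
--                 still.append(p)
--         pending = still
--     return {w: first[w.lower()] for w in words if w.lower() in first}
-- ===== Notes on version B (the rewrite author's own statement) =====
-- stated objective: alternative
-- what changed: B inverts the traversal: instead of A's word-major search (one substring scan of the story per word), B sweeps the story positions once left to right, matching every still-pending deduplicated lowered pattern at each index and stopping when none is pending, then assembles the result from that first-occurrence table in words order.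
import Mathlib
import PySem

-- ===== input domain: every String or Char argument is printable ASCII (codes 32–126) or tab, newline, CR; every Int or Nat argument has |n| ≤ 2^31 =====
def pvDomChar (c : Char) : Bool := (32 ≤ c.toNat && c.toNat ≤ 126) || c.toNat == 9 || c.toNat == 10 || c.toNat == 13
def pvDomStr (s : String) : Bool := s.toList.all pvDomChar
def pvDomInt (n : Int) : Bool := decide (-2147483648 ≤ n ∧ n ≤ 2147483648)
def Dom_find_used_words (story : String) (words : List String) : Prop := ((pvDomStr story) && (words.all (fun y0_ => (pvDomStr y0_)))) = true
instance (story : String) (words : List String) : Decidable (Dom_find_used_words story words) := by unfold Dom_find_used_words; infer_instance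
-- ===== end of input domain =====

-- B replaces A's word-major search (one substring scan of the story per word) by a single
-- position-major sweep of the story matching the still-pending lowered patterns; objective: alternative.

-- ===== PORT A =====
-- A: for each word, test `word.lower() in story_lower`, then `story_lower.index(word.lower())`.
-- Under the `in` guard, .index never raises and equals Str.find (first occurrence) — exact here.
def find_used_words (story : String) (words : List String) : List (String × Int) :=
  let story_lower := PySem.Str.lower story
  (words.foldl (fun used_words word =>
      if PySem.Str.isIn (PySem.Str.lower word) story_lower then
        used_words.insert word (PySem.Str.find story_lower (PySem.Str.lower word))
      else used_words)
    (PySem.Dict.empty : PySem.Dict String Int)).items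

-- ===== PORT B =====
-- B helper: the body of B's outer loop at position i — if no pattern is pending keep the
-- state (the `break`), else one inner pass over `pending` building (first, still).
def pvStepB (sl : String) (st : PySem.Dict String Int × List String) (i : Int) :
    PySem.Dict String Int × List String :=
  if st.2.isEmpty then st
  else
    st.2.foldl (fun (ac : PySem.Dict String Int × List String) p =>
        if PySem.Str.slice sl (some i) (some (i + PySem.Str.len p)) = p
        then (ac.1.insert p i, ac.2)
        else (ac.1, ac.2 ++ [p]))
      (st.1, ([] : List String))

-- B: pending = ordered dedup of lowered words; sweep positions 0..len(story); then assemble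
-- the output dict from the first-occurrence table in `words` order.
def find_used_words_alt (story : String) (words : List String) : List (String × Int) :=
  let story_lower := PySem.Str.lower story
  let st := (PySem.List.pyRange 0 (PySem.Str.len story_lower + 1)).foldl (pvStepB story_lower)
      ((PySem.Dict.empty : PySem.Dict String Int), PySem.List.dedup (words.map PySem.Str.lower))
  (words.foldl (fun d w =>
      let wl := PySem.Str.lower w
      if st.1.contains wl then d.insert w (st.1.getD wl 0) else d)
    (PySem.Dict.empty : PySem.Dict String Int)).items

-- ===== PRECONDITION & SPEC =====
def Spec_find_used_words (story : String) (words : List String) (out : List (String × Int)) : Prop := out = find_used_words_alt story words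
instance (story : String) (words : List String) (out : List (String × Int)) : Decidable (Spec_find_used_words story words out) := by unfold Spec_find_used_words; infer_instance

-- ===== CLAIM (what is proved, stated in full; the proofs are below) =====
def Claim_equal_find_used_words : Prop := ∀ (story : String) (words : List String), Dom_find_used_words story words → Spec_find_used_words story words (find_used_words story words)

-- ===== LEMMAS AND PROOFS =====

-- The slice test of B at a natural position i is "p starts at index i".
theorem pvHit_iff (sl : String) (i : Nat) (p : String) :
    (PySem.Str.slice sl (some (i : Int)) (some ((i : Int) + PySem.Str.len p)) = p)
      ↔ p.toList <+: sl.toList.drop i := by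
  rw [← String.toList_inj, PySem.Str.toList_slice, PySem.Str.len_eq,
    PySem.Chars.slice_eq_listSlice, PySem.List.slice_natCast_add,
    List.prefix_iff_eq_take, eq_comm]

-- B's inner loop over `pending`, split into its two components.
theorem pvInner (sl : String) (i : Int) (pend : List String) :
    ∀ (d : PySem.Dict String Int) (acc : List String),
    pend.foldl (fun (ac : PySem.Dict String Int × List String) p =>
        if PySem.Str.slice sl (some i) (some (i + PySem.Str.len p)) = p
        then (ac.1.insert p i, ac.2)
        else (ac.1, ac.2 ++ [p])) (d, acc)
    = (pend.foldl (fun d p =>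
          if PySem.Str.slice sl (some i) (some (i + PySem.Str.len p)) = p
          then d.insert p i else d) d,
       acc ++ pend.filter (fun p =>
          ! decide (PySem.Str.slice sl (some i) (some (i + PySem.Str.len p)) = p))) := by
  induction pend with
  | nil => intro d acc; simp
  | cons q pend ih =>
    intro d acc
    rw [List.foldl_cons, List.foldl_cons, List.filter_cons]
    by_cases hq : PySem.Str.slice sl (some i) (some (i + PySem.Str.len q)) = q
    · rw [if_pos hq, if_pos hq, ih, if_neg (by rw [decide_eq_true hq]; simp)]
    · rw [if_neg hq, if_neg hq, ih, if_pos (by rw [decide_eq_false hq]; simp)]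
      simp

-- get? after the dict component of B's inner loop.
theorem pvGetFold (sl : String) (i : Int) (pend : List String) (p : String) :
    ∀ d : PySem.Dict String Int,
    (pend.foldl (fun d q =>
        if PySem.Str.slice sl (some i) (some (i + PySem.Str.len q)) = q
        then d.insert q i else d) d).get? p
    = if p ∈ pend ∧ PySem.Str.slice sl (some i) (some (i + PySem.Str.len p)) = p
      then some i else d.get? p := by
  induction pend with
  | nil => intro d; simp
  | cons q pend ih =>
    intro d
    by_cases hq : PySem.Str.slice sl (some i) (some (i + PySem.Str.len q)) = q
    · rw [List.foldl_cons, if_pos hq, ih]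
      by_cases hmem : p ∈ pend ∧ PySem.Str.slice sl (some i) (some (i + PySem.Str.len p)) = p
      · rw [if_pos hmem, if_pos ⟨List.mem_cons_of_mem q hmem.1, hmem.2⟩]
      · rw [if_neg hmem]
        by_cases hpq : p = q
        · subst hpq
          rw [if_pos ⟨List.mem_cons_self, hq⟩, PySem.Dict.get?_insert_self]
        · rw [PySem.Dict.get?_insert_of_ne _ _ hpq,
            if_neg (fun h => hmem ⟨(List.mem_cons.mp h.1).resolve_left hpq, h.2⟩)]
    · rw [List.foldl_cons, if_neg hq, ih]
      by_cases hmem : p ∈ pend ∧ PySem.Str.slice sl (some i) (some (i + PySem.Str.len p)) = p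
      · rw [if_pos hmem, if_pos ⟨List.mem_cons_of_mem q hmem.1, hmem.2⟩]
      · rw [if_neg hmem]
        by_cases hpq : p = q
        · subst hpq
          rw [if_neg (fun h => hq h.2)]
        · rw [if_neg (fun h => hmem ⟨(List.mem_cons.mp h.1).resolve_left hpq, h.2⟩)]

-- If p matches at i and nowhere before, then i is p's find-index.
theorem pvFind_eq (slL pL : List Char) (i : Nat)
    (hnb : ∀ j < i, ¬ pL <+: slL.drop j) (hi : pL <+: slL.drop i) :
    PySem.Chars.find slL pL = (i : Int) := by
  have hinf : pL <:+: slL := hi.isInfix.trans (List.drop_suffix i slL).isInfix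
  have hnn : 0 ≤ PySem.Chars.find slL pL := (PySem.Chars.find_nonneg_iff slL pL).mpr hinf
  obtain ⟨hpref, hmin⟩ := PySem.Chars.find_spec hnn
  have : (PySem.Chars.find slL pL).toNat = i := by
    rcases lt_trichotomy (PySem.Chars.find slL pL).toNat i with h | h | h
    · exact absurd hpref (hnb _ h)
    · exact h
    · exact absurd hi (hmin i h)
  omega

-- The loop invariant: after sweeping positions < i, `first` holds exactly the patterns that
-- start somewhere before i (at their find-index) and `pending` holds exactly the others.
def pvInv (slL : List Char) (P0 : List String) (i : Nat)
    (st : PySem.Dict String Int × List String) : Prop :=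
  ∀ p ∈ P0,
    ((∃ j < i, p.toList <+: slL.drop j) →
        st.1.get? p = some (PySem.Chars.find slL p.toList) ∧ p ∉ st.2) ∧
    (¬ (∃ j < i, p.toList <+: slL.drop j) →
        st.1.get? p = none ∧ p ∈ st.2)

theorem pvStep_inv (sl : String) (P0 : List String) (i : Nat)
    (st : PySem.Dict String Int × List String) (h : pvInv sl.toList P0 i st) :
    pvInv sl.toList P0 (i + 1) (pvStepB sl st (i : Int)) := by
  by_cases he : st.2.isEmpty
  · unfold pvStepB
    rw [if_pos he]
    intro p hp
    rcases h p hp with ⟨hf, hn⟩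
    constructor
    · intro ⟨j, hj, hjp⟩
      by_cases hfb : ∃ j < i, p.toList <+: sl.toList.drop j
      · exact hf hfb
      · exact absurd ((hn hfb).2) (by simp [List.isEmpty_iff.mp he])
    · intro hnfb
      exact hn (fun ⟨j, hj, hjp⟩ => hnfb ⟨j, by omega, hjp⟩)
  · unfold pvStepB
    rw [if_neg he, pvInner]
    intro p hp
    rcases h p hp with ⟨hf, hn⟩
    constructor
    · intro ⟨j, hj, hjp⟩
      by_cases hfb : ∃ j < i, p.toList <+: sl.toList.drop j
      · rcases hf hfb with ⟨hg, hnm⟩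
        refine ⟨?_, ?_⟩
        · rw [pvGetFold, if_neg (fun hc => hnm hc.1), hg]
        · simp only [List.mem_append, List.mem_filter]
          rintro (hc | hc)
          · exact absurd hc (List.not_mem_nil)
          · exact hnm hc.1
      · -- p is first matched at exactly position i
        have hji : j = i := by
          by_contra hne
          exact hfb ⟨j, by omega, hjp⟩
        rw [hji] at hjp
        rcases hn hfb with ⟨hg, hm⟩
        have hhit : PySem.Str.slice sl (some (i : Int)) (some ((i : Int) + PySem.Str.len p)) = p :=
          (pvHit_iff sl i p).mpr hjp
        refine ⟨?_, ?_⟩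
        · rw [pvGetFold, if_pos ⟨hm, hhit⟩,
            pvFind_eq sl.toList p.toList i (fun k hk hkp => hfb ⟨k, hk, hkp⟩) hjp]
        · simp only [List.mem_append, List.mem_filter]
          rintro (hc | hc)
          · exact absurd hc (List.not_mem_nil)
          · exact absurd hc.2 (by rw [decide_eq_true hhit]; simp)
    · intro hnfb
      have hfb : ¬ ∃ j < i, p.toList <+: sl.toList.drop j :=
        fun ⟨j, hj, hjp⟩ => hnfb ⟨j, by omega, hjp⟩
      have hnh : ¬ (PySem.Str.slice sl (some (i : Int)) (some ((i : Int) + PySem.Str.len p)) = p) :=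
        fun hc => hnfb ⟨i, by omega, (pvHit_iff sl i p).mp hc⟩
      rcases hn hfb with ⟨hg, hm⟩
      refine ⟨?_, ?_⟩
      · rw [pvGetFold, if_neg (fun hc => hnh hc.2), hg]
      · simp only [List.mem_append, List.mem_filter]
        exact Or.inr ⟨hm, by rw [decide_eq_false hnh]; simp⟩

theorem pvFold_inv (sl : String) (P0 : List String) :
    ∀ (m i : Nat) (st : PySem.Dict String Int × List String), pvInv sl.toList P0 i st →
    pvInv sl.toList P0 (i + m)
      (((List.range' i m).map (fun k : Nat => Int.ofNat k)).foldl (pvStepB sl) st) := by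
  intro m
  induction m with
  | zero => intro i st h; simpa using h
  | succ m ih =>
    intro i st h
    rw [List.range'_succ, List.map_cons, List.foldl_cons]
    have := ih (i + 1) _ (pvStep_inv sl P0 i st h)
    simpa [Nat.add_comm, Nat.add_assoc, Nat.add_left_comm] using this

theorem pvInv_init (slL : List Char) (P0 : List String) :
    pvInv slL P0 0 ((PySem.Dict.empty : PySem.Dict String Int), P0) := by
  intro p hp
  refine ⟨fun ⟨j, hj, _⟩ => absurd hj (by omega), fun _ => ⟨?_, hp⟩⟩
  simp [PySem.Dict.get?_empty]

-- A pattern starts somewhere in positions 0..len iff it occurs as a substring.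
theorem pvFB_full (slL pL : List Char) :
    (∃ j < slL.length + 1, pL <+: slL.drop j) ↔ PySem.Chars.isIn pL slL = true := by
  constructor
  · intro ⟨j, _, hjp⟩
    exact (PySem.Chars.exists_prefix_drop_iff_isIn pL slL).mp ⟨j, hjp⟩
  · intro h
    obtain ⟨j, hjp⟩ := (PySem.Chars.exists_prefix_drop_iff_isIn pL slL).mpr h
    by_cases hj : j ≤ slL.length
    · exact ⟨j, by omega, hjp⟩
    · refine ⟨slL.length, by omega, ?_⟩
      rw [List.drop_length]
      rwa [List.drop_eq_nil_of_le (by omega)] at hjp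

-- A's fold over `words` equals B's final fold, for any sweep state satisfying the invariant.
theorem pvFinal (story : String) (words : List String)
    (st : PySem.Dict String Int × List String)
    (hinv : pvInv (PySem.Str.lower story).toList (PySem.List.dedup (words.map PySem.Str.lower))
      ((PySem.Str.lower story).toList.length + 1) st) :
    find_used_words story words
      = (words.foldl (fun d w =>
            let wl := PySem.Str.lower w
            if st.1.contains wl then d.insert w (st.1.getD wl 0) else d)
          (PySem.Dict.empty : PySem.Dict String Int)).items := by
  simp only [find_used_words]
  refine congrArg PySem.Dict.items (PySem.List.foldl_congr_mem words _ _ _ ?_)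
  intro acc w hw
  have hwP0 : PySem.Str.lower w ∈ PySem.List.dedup (words.map PySem.Str.lower) := by
    rw [PySem.List.mem_dedup]
    exact List.mem_map_of_mem hw
  rcases hinv (PySem.Str.lower w) hwP0 with ⟨hf, hn⟩
  by_cases hin : PySem.Chars.isIn (PySem.Str.lower w).toList (PySem.Str.lower story).toList = true
  · rcases hf ((pvFB_full _ _).mpr hin) with ⟨hg, _⟩
    have hcon : st.1.contains (PySem.Str.lower w) = true := by
      rw [PySem.Dict.contains_eq_isSome_get?, hg]; rfl
    have hget : st.1.getD (PySem.Str.lower w) 0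
        = PySem.Chars.find (PySem.Str.lower story).toList (PySem.Str.lower w).toList := by
      rw [PySem.Dict.getD_eq_get?_getD, hg]; rfl
    rw [if_pos (by simpa [PySem.Str.isIn_eq] using hin)]
    simp only [hcon, if_true, hget]
    rw [show PySem.Str.find (PySem.Str.lower story) (PySem.Str.lower w)
        = PySem.Chars.find (PySem.Str.lower story).toList (PySem.Str.lower w).toList from by
      simp [PySem.Str.find_eq]]
  · have hnfb := hn (fun hfb => hin ((pvFB_full _ _).mp hfb))
    have hcon : st.1.contains (PySem.Str.lower w) = false := by
      rw [PySem.Dict.contains_eq_isSome_get?, hnfb.1]; rfl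
    rw [if_neg (by simpa [PySem.Str.isIn_eq] using hin)]
    simp only [hcon, Bool.false_eq_true, if_false]

-- ===== VERDICT (by name: the statement is the Claim_ definition above) =====
theorem find_used_words_spec : Claim_equal_find_used_words := by
  intro story words _
  unfold Spec_find_used_words
  have hrange : PySem.List.pyRange 0 (PySem.Str.len (PySem.Str.lower story) + 1)
      = (List.range' 0 ((PySem.Str.lower story).toList.length + 1)).map (fun k : Nat => Int.ofNat k) := by
    rw [PySem.Str.len_eq,
      show (((PySem.Str.lower story).toList.length : Int) + 1)
          = (((PySem.Str.lower story).toList.length + 1 : Nat) : Int) by push_cast; ring,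
      PySem.List.pyRange_zero_natCast, List.range_eq_range']
    rfl
  have hinv := pvFold_inv (PySem.Str.lower story) (PySem.List.dedup (words.map PySem.Str.lower))
    ((PySem.Str.lower story).toList.length + 1) 0 _
    (pvInv_init (PySem.Str.lower story).toList (PySem.List.dedup (words.map PySem.Str.lower)))
  rw [← hrange] at hinv
  simp only [Nat.zero_add] at hinv
  rw [pvFinal story words _ hinv]
  rfl
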